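-- pv_equiv track=rewrite | github.com/ChrisCrouse/pedal-bench | backend/pedal_bench/io/pedalpcb_extract.py | _find_page_index
-- ===== SOURCE A (Python) =====
-- def _find_page_index(page_texts: list[str], keywords: tuple[str, ...]) -> int | None:
--     for idx, text in enumerate(page_texts):
--         lower = text.lower()
--         if all(kw in lower for kw in keywords):
--             return idx
--     # Fallback: any single keyword match.
--     for idx, text in enumerate(page_texts):
--         lower = text.lower()
--         if any(kw in lower for kw in keywords):
--             return idx
--     return None
-- ===== SOURCE B (Python) =====
-- def _find_page_index(page_texts: list[str], keywords: tuple[str, ...]) -> int | None: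
--     # Single pass: per page, look up the first MISSING keyword (none => full match,
--     # return at once); fallback slot gets the first page owning at least one keyword.
--     first_any = None
--     for idx, text in enumerate(page_texts):
--         lower = text.lower()
--         if next((kw for kw in keywords if kw not in lower), None) is None:
--             return idx
--         if first_any is None and next((kw for kw in keywords if kw in lower), None) is not None:
--             first_any = idx
--     return first_any
-- ===== Notes on version B (the rewrite author's own statement) =====
-- stated objective: alternative
-- what changed: Replaces A's two staged all()/any() scans by one pass that classifies each page via first-missing/first-present keyword lookups (next over a generator), returning on a page with no missing keyword and remembering the first page with a present keyword as the fallback.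
import Mathlib
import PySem

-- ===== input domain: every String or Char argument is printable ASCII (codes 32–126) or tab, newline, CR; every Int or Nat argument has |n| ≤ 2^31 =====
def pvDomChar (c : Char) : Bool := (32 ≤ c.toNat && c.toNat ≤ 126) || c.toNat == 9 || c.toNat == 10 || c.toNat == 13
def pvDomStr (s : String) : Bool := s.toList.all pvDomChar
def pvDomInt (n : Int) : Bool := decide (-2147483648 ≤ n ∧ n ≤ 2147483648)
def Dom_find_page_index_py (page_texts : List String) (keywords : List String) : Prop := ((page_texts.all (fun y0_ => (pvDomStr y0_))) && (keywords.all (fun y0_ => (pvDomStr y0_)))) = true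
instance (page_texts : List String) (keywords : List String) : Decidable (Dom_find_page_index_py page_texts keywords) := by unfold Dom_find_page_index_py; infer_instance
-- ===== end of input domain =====

-- B replaces A's two staged all()/any() scans by one pass classifying each page via
-- first-missing / first-present keyword lookups, with a remembered fallback slot (objective: alternative).

-- ===== PORT A =====
-- first loop of A: first index whose lowered text contains ALL keywords
def pvLoopAll (keywords : List String) : List String → Int → Option Int
  | [], _ => none
  | t :: rest, idx =>
    let lower := PySem.Str.lower t
    if keywords.all (fun kw => PySem.Str.isIn kw lower) then some idx
    else pvLoopAll keywords rest (idx + 1)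

-- second loop of A: first index whose lowered text contains ANY keyword
def pvLoopAny (keywords : List String) : List String → Int → Option Int
  | [], _ => none
  | t :: rest, idx =>
    let lower := PySem.Str.lower t
    if keywords.any (fun kw => PySem.Str.isIn kw lower) then some idx
    else pvLoopAny keywords rest (idx + 1)

def find_page_index_py (page_texts : List String) (keywords : List String) : Option Int :=
  match pvLoopAll keywords page_texts 0 with
  | some i => some i
  | none => pvLoopAny keywords page_texts 0

-- ===== PORT B =====
-- next((kw for kw in keywords if kw not in lower), None)
def pvFirstMissing (lower : String) (keywords : List String) : Option String :=
  keywords.find? (fun kw => !(PySem.Str.isIn kw lower))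

-- next((kw for kw in keywords if kw in lower), None)
def pvFirstHit (lower : String) (keywords : List String) : Option String :=
  keywords.find? (fun kw => PySem.Str.isIn kw lower)

-- B's single pass over the enumerated pages, carrying the fallback slot
def pvScanPages (keywords : List String) : List (Int × String) → Option Int → Option Int
  | [], firstAny => firstAny
  | (idx, text) :: rest, firstAny =>
    let lower := PySem.Str.lower text
    if (pvFirstMissing lower keywords).isNone then some idx
    else if firstAny.isNone && (pvFirstHit lower keywords).isSome then
      pvScanPages keywords rest (some idx)
    else pvScanPages keywords rest firstAny

def find_page_index_py_alt (page_texts : List String) (keywords : List String) : Option Int :=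
  pvScanPages keywords (PySem.List.enumerate page_texts) none

-- ===== PRECONDITION & SPEC =====
def Spec_find_page_index_py (page_texts : List String) (keywords : List String) (out : Option Int) : Prop := out = find_page_index_py_alt page_texts keywords
instance (page_texts : List String) (keywords : List String) (out : Option Int) : Decidable (Spec_find_page_index_py page_texts keywords out) := by unfold Spec_find_page_index_py; infer_instance

-- ===== CLAIM (what is proved, stated in full; the proofs are below) =====
def Claim_equal_find_page_index_py : Prop := ∀ (page_texts : List String) (keywords : List String), Dom_find_page_index_py page_texts keywords → Spec_find_page_index_py page_texts keywords (find_page_index_py page_texts keywords)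

-- ===== LEMMAS AND PROOFS =====

-- generic: find? of the negation returns none iff all hold
theorem pvFindNot_isNone {a : Type} (p : a -> Bool) (l : List a) :
    (l.find? (fun x => !(p x))).isNone = l.all p := by
  induction l with
  | nil => rfl
  | cons x xs ih =>
    cases hx : p x with
    | true => simp [hx, ih]
    | false => simp [hx]

-- generic: find? returns some iff any holds
theorem pvFind_isSome {a : Type} (p : a -> Bool) (l : List a) :
    (l.find? p).isSome = l.any p := by
  induction l with
  | nil => rfl
  | cons x xs ih =>
    cases hx : p x with
    | true => simp [hx]
    | false => simp [hx, ih]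

-- no missing keyword ↔ all keywords present
theorem pvFirstMissing_isNone (lower : String) (keywords : List String) :
    (pvFirstMissing lower keywords).isNone =
      keywords.all (fun kw => PySem.Str.isIn kw lower) := by
  unfold pvFirstMissing
  exact pvFindNot_isNone _ _

-- some present keyword ↔ any keyword present
theorem pvFirstHit_isSome (lower : String) (keywords : List String) :
    (pvFirstHit lower keywords).isSome =
      keywords.any (fun kw => PySem.Str.isIn kw lower) := by
  unfold pvFirstHit
  exact pvFind_isSome _ _

-- invariant of B's pass: A's all-scan first, then the remembered index, then A's any-scan
theorem pvScanPages_eq (keywords : List String) :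
    ∀ (pts : List String) (s : Int) (fa : Option Int),
      pvScanPages keywords (PySem.List.enumerate pts s) fa =
        match pvLoopAll keywords pts s with
        | some i => some i
        | none => match fa with
                  | some j => some j
                  | none => pvLoopAny keywords pts s := by
  intro pts
  induction pts with
  | nil => intro s fa; cases fa <;> rfl
  | cons t rest ih =>
    intro s fa
    rw [PySem.List.enumerate_cons]
    simp only [pvScanPages, pvLoopAll, pvLoopAny, pvFirstMissing_isNone, pvFirstHit_isSome]
    by_cases hall : (keywords.all fun kw => PySem.Str.isIn kw (PySem.Str.lower t)) = true
    · simp only [hall, if_true]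
    · rw [Bool.not_eq_true] at hall
      simp only [hall, Bool.false_eq_true, if_false]
      cases fa with
      | some j =>
        simp only [Option.isNone_some, Bool.false_and, Bool.false_eq_true, if_false, ih]
      | none =>
        by_cases hany : (keywords.any fun kw => PySem.Str.isIn kw (PySem.Str.lower t)) = true
        · simp only [hany, Option.isNone_none, Bool.true_and, if_true, ih]
        · rw [Bool.not_eq_true] at hany
          simp only [hany, Option.isNone_none, Bool.true_and, Bool.false_eq_true, if_false, ih]

-- ===== VERDICT (by name: the statement is the Claim_ definition above) =====
theorem find_page_index_py_spec : Claim_equal_find_page_index_py := by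
  intro pts kws _
  unfold Spec_find_page_index_py find_page_index_py find_page_index_py_alt
  rw [pvScanPages_eq]
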